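-- pv_equiv track=rewrite | github.com/Sebastiaan-Alvarez-Rodriguez/MetaSpark | src/cloudlab/util.py | _ensure_version
-- ===== SOURCE A (Python) =====
-- def _ensure_version(nums, string, greater_allowed=True):
--     for idx, x in enumerate(nums):
--         try:
--             found, string = string.split('.', 1)
--         except ValueError as e: # Previous version numbers equal to minimum, now out of numbers
--             return not any(x for x in nums[idx:] if x > 0) # Return True if minimum has only zeroes from here
--
--         if int(found) > x: # Current version number larger than minimum required
--             return True and greater_allowed
--         elif int(found) < x: # Previous version numbers equal to minimum, now smaller
--             return False
-- ===== SOURCE B (Python) =====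
-- def _ensure_version(nums, string, greater_allowed=True):
--     parts = string.split('.')[:-1]
--     for found, x in zip(parts, nums):
--         v = int(found)
--         if v != x:
--             return greater_allowed if v > x else False
--     if len(parts) < len(nums):
--         return not any(n > 0 for n in nums[len(parts):])
--     return None
-- ===== Notes on version B (the rewrite author's own statement) =====
-- stated objective: simpler
-- what changed: A incrementally peels one component per iteration with string.split('.', 1) and uses the ValueError from tuple unpacking as control flow; B splits the string once, drops the never-compared last component, and walks zip(parts, nums) with an explicit post-loop check.
import Mathlib
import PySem

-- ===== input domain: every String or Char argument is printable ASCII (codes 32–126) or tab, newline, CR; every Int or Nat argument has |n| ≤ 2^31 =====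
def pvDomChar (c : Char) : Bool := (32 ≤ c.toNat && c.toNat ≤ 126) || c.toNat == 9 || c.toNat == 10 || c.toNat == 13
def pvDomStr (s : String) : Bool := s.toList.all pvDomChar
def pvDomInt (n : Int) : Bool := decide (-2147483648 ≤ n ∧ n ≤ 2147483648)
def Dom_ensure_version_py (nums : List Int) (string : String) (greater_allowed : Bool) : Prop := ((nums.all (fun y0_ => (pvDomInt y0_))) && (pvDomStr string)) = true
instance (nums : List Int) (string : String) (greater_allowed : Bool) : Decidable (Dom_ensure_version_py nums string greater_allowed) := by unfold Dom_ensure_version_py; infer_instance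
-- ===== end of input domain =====

-- B replaces A's exception-driven incremental split('.', 1) parse by one eager split plus a zip
-- over the pre-split components (objective: simpler; same cost). Return-value equivalence only.

-- ===== PORT A =====
-- A's for-loop over nums, carrying the shrinking remainder string; the `_ => …` arm is the
-- ValueError (unpacking) branch, and `none` from int() (ofChars?) marks where Python A raises
-- (excluded by Pre_).
def pvLoopA (ga : Bool) : List Int → List Char → Option Bool
  | [], _ => none
  | x :: rest, s =>
    match PySem.Chars.splitMax? s ['.'] 1 with
    | some [found, s'] =>
      match PySem.Int.ofChars? found with
      | none => none
      | some v =>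
        if v > x then some (true && ga)
        else if v < x then some false
        else pvLoopA ga rest s'
    | _ => some (!((x :: rest).any (fun n => decide (0 < n))))

def ensure_version_py (nums : List Int) (string : String) (greater_allowed : Bool) : Option Bool :=
  pvLoopA greater_allowed nums string.toList

-- ===== PORT B =====
-- B's for-loop over zip(parts, nums); on exhaustion the post-loop check runs (nums0/plen are
-- Source B's `nums` and `len(parts)`); `none` from int() marks where Python B raises (outside Pre_).
def pvLoopB (ga : Bool) (nums0 : List Int) (plen : Nat) : List (List Char × Int) → Option Bool
  | [] =>
    if plen < nums0.length then
      some (!((PySem.List.slice nums0 (some (plen : Int)) none).any (fun n => decide (0 < n))))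
    else none
  | (found, x) :: rest =>
    match PySem.Int.ofChars? found with
    | none => none
    | some v =>
      if v ≠ x then (if v > x then some ga else some false)
      else pvLoopB ga nums0 plen rest

def ensure_version_py_alt (nums : List Int) (string : String) (greater_allowed : Bool) : Option Bool :=
  let parts := PySem.List.slice (PySem.Chars.splitOn string.toList ['.']) none (some (-1))
  pvLoopB greater_allowed nums parts.length (parts.zip nums)

-- ===== PRECONDITION & SPEC =====
-- Pre_ excludes exactly the inputs where Python A raises ValueError from int(): some reached
-- component (all earlier ones parsed and equalled the minimum) is not an int literal.  On every
-- input where A returns, Pre_ holds.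
def Pre_ensure_version_py (nums : List Int) (string : String) (greater_allowed : Bool) : Prop :=
  ∀ i < min nums.length ((PySem.Chars.splitOn string.toList ['.']).dropLast).length,
    (∀ j < i, PySem.Int.ofChars? (((PySem.Chars.splitOn string.toList ['.']).dropLast).getD j []) = some (nums.getD j 0)) →
    (PySem.Int.ofChars? (((PySem.Chars.splitOn string.toList ['.']).dropLast).getD i [])).isSome = true
instance (nums : List Int) (string : String) (greater_allowed : Bool) : Decidable (Pre_ensure_version_py nums string greater_allowed) := by unfold Pre_ensure_version_py; infer_instance

def pvWitness_ensure_version_py : List Int × String × Bool := ([1, 2], "1.2.3", true)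

def Spec_ensure_version_py (nums : List Int) (string : String) (greater_allowed : Bool) (out : Option Bool) : Prop := out = ensure_version_py_alt nums string greater_allowed
instance (nums : List Int) (string : String) (greater_allowed : Bool) (out : Option Bool) : Decidable (Spec_ensure_version_py nums string greater_allowed out) := by unfold Spec_ensure_version_py; infer_instance

-- ===== CLAIM (what is proved, stated in full; the proofs are below) =====
def Claim_equal_ensure_version_py : Prop := ∀ (nums : List Int) (string : String) (greater_allowed : Bool), Dom_ensure_version_py nums string greater_allowed → Pre_ensure_version_py nums string greater_allowed → Spec_ensure_version_py nums string greater_allowed (ensure_version_py nums string greater_allowed)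

-- ===== LEMMAS AND PROOFS =====

-- Simple structural recursions mirroring str.split('.') (proof-side only).
def pvSplit : List Char → List (List Char)
  | [] => [[]]
  | c :: rest => if c = '.' then [] :: pvSplit rest else (pvSplit rest).modifyHead (c :: ·)

def pvSplit1 : List Char → Option (List Char × List Char)
  | [] => none
  | c :: rest => if c = '.' then some ([], rest) else (pvSplit1 rest).map (fun p => (c :: p.1, p.2))

theorem pvSplit_ne_nil (l : List Char) : pvSplit l ≠ [] := by
  cases l with
  | nil => simp [pvSplit]
  | cons c rest =>
    simp only [pvSplit]
    split
    · simp
    · cases h : pvSplit rest with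
      | nil => exact absurd h (pvSplit_ne_nil rest)
      | cons a t => simp [List.modifyHead]

theorem pvSplit1_none {l : List Char} (h : pvSplit1 l = none) : pvSplit l = [l] := by
  induction l with
  | nil => simp [pvSplit]
  | cons c rest ih =>
    simp only [pvSplit1] at h
    simp only [pvSplit]
    by_cases hc : c = '.'
    · simp [hc] at h
    · simp only [if_neg hc] at h ⊢
      rw [ih (by simpa using h)]
      simp [List.modifyHead]

theorem pvSplit1_some {l a b : List Char} (h : pvSplit1 l = some (a, b)) :
    pvSplit l = a :: pvSplit b := by
  induction l generalizing a b with
  | nil => simp [pvSplit1] at h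
  | cons c rest ih =>
    simp only [pvSplit1] at h
    simp only [pvSplit]
    by_cases hc : c = '.'
    · simp only [if_pos hc] at h
      obtain ⟨rfl, rfl⟩ := by simpa using h
      simp [hc]
    · simp only [if_neg hc] at h ⊢
      obtain ⟨⟨a', b'⟩, h1, h2⟩ := Option.map_eq_some_iff.mp h
      obtain ⟨rfl, rfl⟩ := by simpa using h2
      rw [ih h1]
      simp [List.modifyHead]

theorem pv_go_eq (l : List Char) : ∀ (fuel : Nat) (cur : List Char) (acc : List (List Char)),
    l.length ≤ fuel →
    PySem.Chars.splitOn.go ['.'] fuel l cur acc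
      = acc.reverse ++ (pvSplit l).modifyHead (cur.reverse ++ ·) := by
  induction l with
  | nil =>
    intro fuel cur acc _
    cases fuel <;> simp [PySem.Chars.splitOn.go, pvSplit, List.modifyHead]
  | cons c rest ih =>
    intro fuel cur acc hf
    cases fuel with
    | zero => simp at hf
    | succ fuel =>
      rw [PySem.Chars.splitOn.go]
      by_cases hc : c = '.'
      · have hp : List.isPrefixOf ['.'] (c :: rest) = true := by simp [List.isPrefixOf, hc]
        rw [if_pos hp]
        simp only [List.length_cons] at hf
        simp only [List.length_cons, List.length_nil, List.drop_succ_cons, List.drop_zero]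
        rw [ih fuel [] (cur.reverse :: acc) (by omega)]
        simp only [pvSplit, if_pos hc, List.modifyHead, List.reverse_cons, List.reverse_nil,
          List.nil_append, List.append_assoc, List.cons_append]
        cases pvSplit rest <;> simp
      · have hp : List.isPrefixOf ['.'] (c :: rest) = false := by
          simp [List.isPrefixOf]
          intro h; exact absurd h.symm hc
        rw [if_neg (by simp [hp])]
        simp only [List.length_cons] at hf
        rw [ih fuel (c :: cur) acc (by omega)]
        simp only [pvSplit, if_neg hc]
        cases h : pvSplit rest with
        | nil => exact absurd h (pvSplit_ne_nil rest)
        | cons a t => simp [List.modifyHead]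

theorem pv_splitOn_eq (l : List Char) : PySem.Chars.splitOn l ['.'] = pvSplit l := by
  rw [PySem.Chars.splitOn, pv_go_eq l (l.length + 1) [] [] (by omega)]
  cases h : pvSplit l with
  | nil => exact absurd h (pvSplit_ne_nil l)
  | cons a t => simp [List.modifyHead]

theorem pv_goMax_zero (l cur : List Char) (acc : List (List Char)) (fuel : Nat) :
    PySem.Chars.splitOnMax.go ['.'] fuel 0 l cur acc = acc.reverse ++ [cur.reverse ++ l] := by
  cases fuel with
  | zero => simp [PySem.Chars.splitOnMax.go]
  | succ fuel => cases l <;> simp [PySem.Chars.splitOnMax.go]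

theorem pv_goMax_one (l : List Char) : ∀ (fuel : Nat) (cur : List Char) (acc : List (List Char)),
    l.length ≤ fuel →
    PySem.Chars.splitOnMax.go ['.'] fuel 1 l cur acc
      = acc.reverse ++ (match pvSplit1 l with
          | none => [cur.reverse ++ l]
          | some (a, b) => [cur.reverse ++ a, b]) := by
  induction l with
  | nil =>
    intro fuel cur acc _
    cases fuel <;> simp [PySem.Chars.splitOnMax.go, pvSplit1]
  | cons c rest ih =>
    intro fuel cur acc hf
    cases fuel with
    | zero => simp at hf
    | succ fuel =>
      rw [PySem.Chars.splitOnMax.go]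
      simp only [List.length_cons] at hf
      by_cases hc : c = '.'
      · have hp : List.isPrefixOf ['.'] (c :: rest) = true := by simp [List.isPrefixOf, hc]
        rw [if_neg (by omega), if_pos hp]
        simp only [Nat.sub_self]
        rw [pv_goMax_zero]
        simp [pvSplit1, hc]
      · have hp : List.isPrefixOf ['.'] (c :: rest) = false := by
          simp [List.isPrefixOf]
          intro h; exact absurd h.symm hc
        rw [if_neg (by omega), if_neg (by simp [hp])]
        rw [ih fuel (c :: cur) acc (by omega)]
        simp only [pvSplit1, if_neg hc]
        cases h : pvSplit1 rest with
        | none => simp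
        | some p => cases p; simp

theorem pv_splitMax_eq (l : List Char) :
    PySem.Chars.splitMax? l ['.'] 1
      = some (match pvSplit1 l with
          | none => [l]
          | some (a, b) => [a, b]) := by
  rw [PySem.Chars.splitMax?]
  rw [if_neg (by simp)]
  rw [PySem.Chars.splitOnMax, if_neg (by norm_num)]
  have h1 : (1 : Int).toNat = 1 := rfl
  rw [h1, pv_goMax_one l (l.length + 1) [] [] (by omega)]
  cases h : pvSplit1 l with
  | none => simp
  | some p => cases p; simp

-- the post-loop value of Source B, as a function of the still-unconsumed suffixes
def pvTail (nums : List Int) (parts : List (List Char)) : Option Bool :=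
  if parts.length < nums.length then
    some (!((nums.drop parts.length).any (fun n => decide (0 < n))))
  else none

theorem pvLoopB_nil (ga : Bool) (nums0 : List Int) (plen : Nat) :
    pvLoopB ga nums0 plen [] = pvTail nums0 (List.replicate plen []) := by
  simp only [pvLoopB, pvTail, List.length_replicate]
  split
  · rename_i h
    rw [PySem.List.slice_from nums0 (by positivity)]
    simp
  · rfl

theorem pv_main (nums : List Int) : ∀ (s : List Char) (ga : Bool) (nums0 : List Int) (plen : Nat),
    (∀ i < min nums.length ((pvSplit s).dropLast).length,
        (∀ j < i, PySem.Int.ofChars? (((pvSplit s).dropLast).getD j []) = some (nums.getD j 0)) →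
        (PySem.Int.ofChars? (((pvSplit s).dropLast).getD i [])).isSome = true) →
    pvLoopB ga nums0 plen [] = pvTail nums ((pvSplit s).dropLast) →
    pvLoopA ga nums s = pvLoopB ga nums0 plen (((pvSplit s).dropLast).zip nums) := by
  induction nums with
  | nil =>
    intro s ga nums0 plen _ ht
    simp only [List.zip_nil_right, pvLoopA, ht, pvTail]
    rw [if_neg (by simp)]
  | cons x rest ih =>
    intro s ga nums0 plen hpre ht
    cases h1 : pvSplit1 s with
    | none =>
      have hs : pvSplit s = [s] := pvSplit1_none h1
      simp only [pvLoopA, pv_splitMax_eq, h1]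
      rw [hs] at ht ⊢
      simp only [List.dropLast_singleton, List.zip_nil_left] at ht ⊢
      rw [ht]
      simp [pvTail]
    | some p =>
      obtain ⟨a, b⟩ := p
      have hs : pvSplit s = a :: pvSplit b := pvSplit1_some h1
      have hb := pvSplit_ne_nil b
      have hdl : (pvSplit s).dropLast = a :: (pvSplit b).dropLast := by
        rw [hs]
        cases hh : pvSplit b with
        | nil => exact absurd hh hb
        | cons u v => simp [List.dropLast]
      simp only [pvLoopA, pv_splitMax_eq, h1]
      rw [hdl] at hpre ht ⊢
      have h0 : (PySem.Int.ofChars? a).isSome = true := by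
        have := hpre 0 (by simp) (by intro j hj; omega)
        simpa using this
      obtain ⟨v, hv⟩ := Option.isSome_iff_exists.mp h0
      simp only [List.zip_cons_cons, pvLoopB, hv]
      by_cases hgt : v > x
      · simp only [if_pos hgt, if_pos (show v ≠ x by omega), Bool.true_and]
      · by_cases hlt : v < x
        · simp only [if_neg hgt, if_pos hlt, if_pos (show v ≠ x by omega)]
        · have hvx : v = x := by omega
          simp only [if_neg hgt, if_neg hlt, if_neg (show ¬ v ≠ x by omega)]
          apply ih b ga nums0 plen
          · intro i hi hj
            have := hpre (i + 1) (by simp at hi ⊢; omega)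
            simp only [List.getD_cons_succ] at this
            apply this
            intro j hjlt
            cases j with
            | zero => simpa [hvx] using hv
            | succ j =>
              simp only [List.getD_cons_succ]
              exact hj j (by omega)
          · rw [ht]
            simp only [pvTail, List.length_cons, List.drop_succ_cons, Nat.add_lt_add_iff_right]

theorem pv_slice_neg1 {α : Type} (xs : List α) :
    PySem.List.slice xs none (some (-1)) = xs.dropLast := by
  simp [PySem.List.slice, List.dropLast_eq_take]

-- ===== VERDICT (by name: the statement is the Claim_ definition above) =====
theorem ensure_version_py_spec : Claim_equal_ensure_version_py := by
  intro nums string ga _ hpre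
  unfold Spec_ensure_version_py ensure_version_py ensure_version_py_alt
  rw [pv_slice_neg1, pv_splitOn_eq]
  unfold Pre_ensure_version_py at hpre
  rw [pv_splitOn_eq] at hpre
  apply pv_main nums string.toList ga nums ((pvSplit string.toList).dropLast).length hpre
  rw [pvLoopB_nil]
  simp only [pvTail, List.length_replicate]
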